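-- pv_equiv track=rewrite | github.com/astilleman/Informatica5 | EXTRAs/Rijtjes en groepen.py | groep
-- ===== SOURCE A (Python) =====
-- def groep(stenen):
--     stenen = list(stenen)
--     i = 1
--     mes = True
--     cijfer = stenen[0][0]
--     kleur = stenen[0][1]
--     while i < len(stenen) and mes is True:
--         if stenen[i][0] != cijfer or stenen[i][1] == kleur:
--             mes = False
--         i += 1
--     return mes
-- ===== SOURCE B (Python) =====
-- def groep(stenen):
--     stenen = list(stenen)
--     cijfer = stenen[0][0]
--     kleur = stenen[0][1]
--     nums = [s[0] for s in stenen]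
--     cols = [s[1] for s in stenen]
--     return min(nums) == cijfer == max(nums) and cols.count(kleur) == 1
-- ===== Notes on version B (the rewrite author's own statement) =====
-- stated objective: alternative
-- what changed: Replaces A's short-circuiting element-vs-first while-loop with order/counting aggregates: min and max of all numbers must both equal the first number, and the count of the first color among all colors must be exactly 1.
import Mathlib
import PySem

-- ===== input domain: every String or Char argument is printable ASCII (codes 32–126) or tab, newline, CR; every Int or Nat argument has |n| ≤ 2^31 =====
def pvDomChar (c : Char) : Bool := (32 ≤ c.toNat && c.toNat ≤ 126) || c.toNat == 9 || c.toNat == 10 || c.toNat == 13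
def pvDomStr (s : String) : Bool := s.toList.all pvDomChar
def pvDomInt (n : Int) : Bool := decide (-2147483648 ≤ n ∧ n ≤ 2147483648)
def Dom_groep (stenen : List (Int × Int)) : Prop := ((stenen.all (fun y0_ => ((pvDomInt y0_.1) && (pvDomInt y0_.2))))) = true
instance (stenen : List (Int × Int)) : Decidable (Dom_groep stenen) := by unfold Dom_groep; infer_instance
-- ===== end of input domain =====

-- One honest line: B replaces A's element-by-element short-circuiting while-loop with
-- order/counting aggregates — min/max of the numbers pinned to the first number, and the
-- count of the first color in all colors equal to 1 (an 'alternative' decomposition).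

-- ===== PORT A =====
-- the while loop over i = 1 .. len-1, carrying mes (stops as soon as mes is False)
def groepLoop (cijfer kleur : Int) : List (Int × Int) → Bool
  | [] => true
  | s :: rest => if s.1 ≠ cijfer ∨ s.2 = kleur then false else groepLoop cijfer kleur rest

def groep (stenen : List (Int × Int)) : Bool :=
  match PySem.List.pyGet? stenen 0 with   -- stenen[0] (IndexError on [], outside Pre_)
  | none => false
  | some s0 => groepLoop s0.1 s0.2 (stenen.drop 1)

-- ===== PORT B =====
def groep_alt (stenen : List (Int × Int)) : Bool :=
  match PySem.List.pyGet? stenen 0 with   -- stenen[0] (IndexError on [], outside Pre_)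
  | none => false
  | some s0 =>
    let nums := stenen.map Prod.fst
    let cols := stenen.map Prod.snd
    -- min(nums) == cijfer == max(nums) and cols.count(kleur) == 1
    (PySem.List.min? nums (fun x => x) == some s0.1) &&
    (PySem.List.max? nums (fun x => x) == some s0.1) &&
    (PySem.List.count cols s0.2 == 1)

-- ===== PRECONDITION & SPEC =====
-- A raises IndexError on the empty list (stenen[0]); Pre_ excludes exactly that input.
def Pre_groep (stenen : List (Int × Int)) : Prop := stenen ≠ []
instance (stenen : List (Int × Int)) : Decidable (Pre_groep stenen) := by unfold Pre_groep; infer_instance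
def pvWitness_groep : (List (Int × Int)) := [(3, 1), (3, 2)]

def Spec_groep (stenen : List (Int × Int)) (out : Bool) : Prop := out = groep_alt stenen
instance (stenen : List (Int × Int)) (out : Bool) : Decidable (Spec_groep stenen out) := by unfold Spec_groep; infer_instance

-- ===== CLAIM =====
def Claim_equal_groep : Prop := ∀ (stenen : List (Int × Int)), Dom_groep stenen → Pre_groep stenen → Spec_groep stenen (groep stenen)

-- ===== LEMMAS AND PROOFS =====
-- A's loop returns true iff every later stone has the same number and a different color
theorem groepLoop_eq_all (c k : Int) (l : List (Int × Int)) :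
    groepLoop c k l = l.all (fun s => s.1 == c && s.2 != k) := by
  induction l with
  | nil => rfl
  | cons s rest ih =>
    simp only [groepLoop, List.all_cons, ih]
    by_cases h1 : s.1 = c <;> by_cases h2 : s.2 = k <;> simp [h1, h2]

-- min and max of a nonempty list both equal c iff every element equals c
theorem minmax_eq_iff (c : Int) (l : List Int) :
    (PySem.List.min? (c :: l) (fun x => x) = some c ∧
     PySem.List.max? (c :: l) (fun x => x) = some c) ↔ ∀ x ∈ l, x = c := by
  constructor
  · rintro ⟨hmin, hmax⟩ x hx
    have h1 := PySem.List.min?_isMin hmin x (List.mem_cons_of_mem _ hx)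
    have h2 := PySem.List.max?_isMax hmax x (List.mem_cons_of_mem _ hx)
    omega
  · intro h
    have hm : PySem.List.min? (c :: l) (fun x => x) = some (l.foldl min c) :=
      PySem.List.min?_id_cons c l
    have hM : PySem.List.max? (c :: l) (fun x => x) = some (l.foldl max c) :=
      PySem.List.max?_id_cons c l
    set m := l.foldl min c with hmdef
    set M := l.foldl max c with hMdef
    have hmmem := PySem.List.min?_mem hm
    have hMmem := PySem.List.max?_mem hM
    have hmc : m = c := by rcases List.mem_cons.mp hmmem with h' | h' <;> [exact h'; exact h _ h']
    have hMc : M = c := by rcases List.mem_cons.mp hMmem with h' | h' <;> [exact h'; exact h _ h']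
    rw [hm, hM, hmc, hMc]
    exact ⟨rfl, rfl⟩

-- ===== VERDICT =====
theorem groep_spec : Claim_equal_groep := by
  intro stenen _ hpre
  unfold Spec_groep groep groep_alt
  match stenen with
  | [] => exact absurd rfl hpre
  | s0 :: rest =>
    have hget : PySem.List.pyGet? (s0 :: rest) (0 : Int) = some s0 := by
      simp [PySem.List.pyGet?, PySem.List.pyIdx?]
    simp only [hget, List.drop_one, List.tail_cons]
    rw [groepLoop_eq_all, Bool.eq_iff_iff]
    simp only [Bool.and_eq_true, beq_iff_eq, List.all_eq_true, bne_iff_ne, ne_eq,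
      PySem.List.count_eq, List.map_cons, List.count_cons_self]
    constructor
    · intro h
      refine ⟨(minmax_eq_iff s0.1 (rest.map Prod.fst)).mpr ?_, ?_⟩
      · intro x hx
        obtain ⟨a, ha, hax⟩ := List.mem_map.mp hx
        rw [← hax]; exact (h a ha).1
      · have : (rest.map Prod.snd).count s0.2 = 0 := by
          rw [List.count_eq_zero]
          intro hmem
          obtain ⟨a, ha, hax⟩ := List.mem_map.mp hmem
          exact (h a ha).2 hax
        omega
    · rintro ⟨hmm, hcnt⟩ a ha
      have hall := (minmax_eq_iff s0.1 (rest.map Prod.fst)).mp hmm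
      refine ⟨hall a.1 (List.mem_map.mpr ⟨a, ha, rfl⟩), fun he => ?_⟩
      have : (rest.map Prod.snd).count s0.2 = 0 := by omega
      exact (List.count_eq_zero.mp this) (List.mem_map.mpr ⟨a, ha, he⟩)
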